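-- pv_equiv track=rewrite | github.com/mishrashyamal/AI-Game-Player | 2x2 Rubiks Cube-part2/Cube.py | stateCompare
-- ===== SOURCE A (Python) =====
-- cubeColor = ["W", "R", "B", "Y", "O", "G"]
--
-- def stateCompare(state1):
--   def colorPosition(color, state):
--     return [pos for pos, char in enumerate(state) if char == color]
--
--   def diffPos(pos):
--     return [pos[i+1]-pos[i] for i in range(len(pos)-1)]
--
--   relativeDistance = 0
--   for color in cubeColor:
--     pos = colorPosition(color, state1)
--     diff = diffPos(pos)
--     relativeDistance += sum(diff) - 3
--
--   return relativeDistance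
-- ===== SOURCE B (Python) =====
-- cubeColor = ["W", "R", "B", "Y", "O", "G"]
--
-- def stateCompare(state1):
--     # one pass: first and last index of each character
--     span = {}
--     for i, ch in enumerate(state1):
--         if ch in span:
--             span[ch] = (span[ch][0], i)
--         else:
--             span[ch] = (i, i)
--     total = 0
--     for color in cubeColor:
--         if color in span:
--             first, last = span[color]
--             total += last - first - 3
--         else:
--             total -= 3
--     return total
-- ===== Notes on version B (the rewrite author's own statement) =====
-- stated objective: faster
-- what changed: Replaces six per-color passes that build position lists and difference lists with a single pass recording each character's first and last index, using the telescoped span (last - first) per color.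
import Mathlib
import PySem

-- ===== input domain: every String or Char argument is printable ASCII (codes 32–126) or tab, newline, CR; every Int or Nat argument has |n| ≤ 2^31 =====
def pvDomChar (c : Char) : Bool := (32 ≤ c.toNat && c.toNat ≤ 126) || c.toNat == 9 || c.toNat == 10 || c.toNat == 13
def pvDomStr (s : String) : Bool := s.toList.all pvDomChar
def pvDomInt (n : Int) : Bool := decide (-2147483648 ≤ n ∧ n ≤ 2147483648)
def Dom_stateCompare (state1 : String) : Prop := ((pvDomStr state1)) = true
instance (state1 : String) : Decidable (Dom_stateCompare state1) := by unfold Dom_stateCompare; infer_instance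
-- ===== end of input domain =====

-- B replaces A's six per-color passes (position lists + difference lists) by ONE pass recording each
-- character's first and last index, then sums the telescoped span (last - first) - 3 per color.

-- ===== PORT A =====
-- Python's cubeColor is a list of 1-character strings; iterating a str yields its characters, so Char is exact here.
def pvCubeColor : List Char := ['W', 'R', 'B', 'Y', 'O', 'G']

def pvColorPosition (color : Char) (state : List Char) : List Int :=
  ((PySem.List.enumerate state 0).filter (fun p => p.2 == color)).map (fun p => p.1)

-- pos[i+1] and pos[i] are always in range for i in range(len(pos)-1), so the default 0 is never used.
def pvDiffPos (pos : List Int) : List Int :=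
  (PySem.List.pyRange 0 ((pos.length : Int) - 1) 1).map
    (fun i => PySem.List.pyGetD pos (i + 1) 0 - PySem.List.pyGetD pos i 0)

def stateCompare (state1 : String) : Int :=
  pvCubeColor.foldl
    (fun relativeDistance color =>
      relativeDistance + ((pvDiffPos (pvColorPosition color state1.toList)).sum - 3)) 0

-- ===== PORT B =====
def pvSpanStep (d : PySem.Dict Char (Int × Int)) (p : Int × Char) : PySem.Dict Char (Int × Int) :=
  match d.get? p.2 with
  | some fl => d.insert p.2 (fl.1, p.1)
  | none => d.insert p.2 (p.1, p.1)

def stateCompare_alt (state1 : String) : Int :=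
  let span := (PySem.List.enumerate state1.toList 0).foldl pvSpanStep PySem.Dict.empty
  pvCubeColor.foldl
    (fun total color =>
      match span.get? color with
      | some fl => total + (fl.2 - fl.1 - 3)
      | none => total - 3) 0

-- ===== PRECONDITION & SPEC =====
def Spec_stateCompare (state1 : String) (out : Int) : Prop := out = stateCompare_alt state1
instance (state1 : String) (out : Int) : Decidable (Spec_stateCompare state1 out) := by unfold Spec_stateCompare; infer_instance

-- ===== CLAIM (what is proved, stated in full; the proofs are below) =====
def Claim_equal_stateCompare : Prop := ∀ (state1 : String), Dom_stateCompare state1 → Spec_stateCompare state1 (stateCompare state1)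

-- ===== LEMMAS AND PROOFS =====

-- positions of c in l, indices starting at i
def pvPosL (c : Char) : List Char → Int → List Int
  | [], _ => []
  | x :: xs, i => if x = c then i :: pvPosL c xs (i + 1) else pvPosL c xs (i + 1)

def pvCombine (o : Option (Int × Int)) : List Int → Option (Int × Int)
  | [] => o
  | h :: t =>
    match o with
    | none => some (h, t.getLastD h)
    | some fl => some (fl.1, t.getLastD h)

lemma colorPosition_eq (c : Char) : ∀ (l : List Char) (i : Int),
    ((PySem.List.enumerate l i).filter (fun p => p.2 == c)).map (fun p => p.1) = pvPosL c l i := by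
  intro l
  induction l with
  | nil => intro i; simp [PySem.List.enumerate_nil, pvPosL]
  | cons x xs ih =>
    intro i
    rw [PySem.List.enumerate_cons]
    by_cases h : x = c
    · simp [pvPosL, h, ih]
    · simp [pvPosL, h, ih]

lemma diffPos_eq_zipWith (p : List Int) :
    pvDiffPos p = List.zipWith (fun a b => a - b) p.tail p := by
  apply List.ext_getElem
  · simp [pvDiffPos, PySem.List.length_pyRange_one]
  · intro k h1 h2
    have hk : k < p.length - 1 := by
      simpa [pvDiffPos, PySem.List.length_pyRange_one] using h1
    have hkr : k < ((p.length : Int) - 1 - 0).toNat := by omega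
    simp only [pvDiffPos, List.getElem_map, List.getElem_zipWith,
      PySem.List.getElem_pyRange_one, zero_add]
    have e1 : (k : Int) + 1 = ((k + 1 : Nat) : Int) := by push_cast; ring
    rw [e1, PySem.List.pyGetD_natCast, PySem.List.pyGetD_natCast]
    rw [List.getD_eq_getElem p 0 (by omega), List.getD_eq_getElem p 0 (by omega),
      List.getElem_tail]

lemma telescope (q : List Int) : ∀ (a : Int),
    (List.zipWith (fun x y => x - y) q (a :: q)).sum = q.getLastD a - a := by
  induction q with
  | nil => intro a; simp
  | cons b r ih =>
    intro a
    simp only [List.zipWith, List.sum_cons, List.getLastD_cons, ih b]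
    ring

lemma diffPos_sum (p : List Int) :
    (pvDiffPos p).sum = match p with
      | [] => 0
      | a :: q => q.getLastD a - a := by
  rw [diffPos_eq_zipWith]
  cases p with
  | nil => simp
  | cons a q => simpa using telescope q a

lemma getLastD_shift (h i : Int) (t : List Int) :
    t.getLast?.getD h = (h :: t).getLast?.getD i := by
  cases t with
  | nil => rfl
  | cons b r =>
    rw [List.getLast?_cons_cons]
    cases hg : (b :: r).getLast? with
    | none => exact absurd hg (by simp [List.getLast?_eq_none_iff])
    | some y => simp

lemma span_get (c : Char) : ∀ (l : List Char) (i : Int) (d : PySem.Dict Char (Int × Int)),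
    ((PySem.List.enumerate l i).foldl pvSpanStep d).get? c = pvCombine (d.get? c) (pvPosL c l i) := by
  intro l
  induction l with
  | nil => intro i d; simp [PySem.List.enumerate_nil, pvPosL, pvCombine]
  | cons x xs ih =>
    intro i d
    rw [PySem.List.enumerate_cons]
    simp only [List.foldl_cons]
    rw [ih (i + 1) (pvSpanStep d (i, x))]
    by_cases h : x = c
    · subst h
      simp only [pvPosL, pvSpanStep]
      cases hd : d.get? x with
      | none =>
        simp only [PySem.Dict.get?_insert_self]
        cases hr : pvPosL x xs (i + 1) with
        | nil => simp [pvCombine]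
        | cons h t =>
          simp only [pvCombine]
          simp [getLastD_shift h i t]
      | some fl =>
        simp only [PySem.Dict.get?_insert_self]
        cases hr : pvPosL x xs (i + 1) with
        | nil => simp [pvCombine]
        | cons h t =>
          simp only [pvCombine]
          simp [getLastD_shift h i t]
    · have hne : c ≠ x := fun he => h he.symm
      have hstep : (pvSpanStep d (i, x)).get? c = d.get? c := by
        unfold pvSpanStep
        cases d.get? x <;> simp [PySem.Dict.get?_insert_of_ne _ _ hne]
      rw [hstep]
      simp [pvPosL, h]

lemma per_color (c : Char) (l : List Char) :
    (pvDiffPos (pvColorPosition c l)).sum =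
      match ((PySem.List.enumerate l 0).foldl pvSpanStep PySem.Dict.empty).get? c with
      | some fl => fl.2 - fl.1
      | none => 0 := by
  rw [span_get c l 0 PySem.Dict.empty]
  simp only [PySem.Dict.get?_empty]
  unfold pvColorPosition
  rw [colorPosition_eq c l 0, diffPos_sum]
  cases hp : pvPosL c l 0 with
  | nil => simp [pvCombine]
  | cons h t => simp [pvCombine]

lemma fold_eq (l : List Char) (cs : List Char) : ∀ (acc : Int),
    cs.foldl (fun relativeDistance color =>
        relativeDistance + ((pvDiffPos (pvColorPosition color l)).sum - 3)) acc =
      cs.foldl (fun total color =>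
        match ((PySem.List.enumerate l 0).foldl pvSpanStep PySem.Dict.empty).get? color with
        | some fl => total + (fl.2 - fl.1 - 3)
        | none => total - 3) acc := by
  induction cs with
  | nil => intro acc; rfl
  | cons c cs ih =>
    intro acc
    simp only [List.foldl_cons]
    rw [ih]
    congr 1
    rw [per_color c l]
    cases ((PySem.List.enumerate l 0).foldl pvSpanStep PySem.Dict.empty).get? c with
    | none => simp; ring
    | some fl => simp

-- ===== VERDICT (by name: the statement is the Claim_ definition above) =====
theorem stateCompare_spec : Claim_equal_stateCompare := by
  intro state1 _
  unfold Spec_stateCompare stateCompare stateCompare_alt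
  exact fold_eq state1.toList pvCubeColor 0
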